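-- pv_equiv track=rewrite | github.com/jenu8628/TIL | algorithm/swea/swea5203_베이비진게임.py | baby
-- ===== SOURCE A (Python) =====
-- def baby(arr):
--     arr.sort()
--     for i in range(len(arr)):
--         if arr.count(arr[i]) == 3:
--             return 1
--     cnt = 0
--     for i in range(len(arr)-1):
--         if arr[i] == arr[i+1]:
--             continue
--         if arr[i] + 1 == arr[i+1]:
--             cnt += 1
--         else:
--             cnt = 0
--         if cnt == 2:
--             return 1
--     return 0
-- ===== SOURCE B (Python) =====
-- def baby(arr):
--     arr.sort()  # kept for the in-place mutation side effect, as in A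
--     c = {}
--     for v in arr:
--         c[v] = c.get(v, 0) + 1
--     if 3 in c.values():
--         return 1
--     s = set(c)
--     if any(v + 1 in s and v + 2 in s for v in s):
--         return 1
--     return 0
-- ===== Notes on version B (the rewrite author's own statement) =====
-- stated objective: simpler
-- what changed: Replaces A's quadratic count-scan and the sorted adjacency run-scan with cnt accumulator by one counting dict (a value with multiplicity exactly 3) plus set-membership probes for three consecutive values.
import Mathlib
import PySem

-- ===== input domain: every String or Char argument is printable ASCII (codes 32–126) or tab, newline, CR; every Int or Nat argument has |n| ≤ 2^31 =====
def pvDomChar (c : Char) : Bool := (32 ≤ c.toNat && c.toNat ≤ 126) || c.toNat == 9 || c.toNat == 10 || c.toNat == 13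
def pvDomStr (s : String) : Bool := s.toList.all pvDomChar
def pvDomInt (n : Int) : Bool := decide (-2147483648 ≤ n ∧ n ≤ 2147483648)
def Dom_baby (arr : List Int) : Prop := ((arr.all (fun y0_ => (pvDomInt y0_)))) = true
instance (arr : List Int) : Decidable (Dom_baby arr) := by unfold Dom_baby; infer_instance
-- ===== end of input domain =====

-- B replaces A's quadratic count-scan and the sorted adjacency run-scan with a counting dict
-- plus set-membership probes for three consecutive values (both sort arr; A mutates arr in
-- place and B keeps that mutation; the equivalence proved is about the return value).


-- ===== PORT A =====
-- 'for i in range(len(arr)): if arr.count(arr[i]) == 3: return 1'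
-- (the index i is only used to read arr[i] in order: structural recursion on the remaining suffix)
def babyLoop1 (a : List Int) : List Int → Bool
  | [] => false
  | x :: rest => if PySem.List.count a x = 3 then true else babyLoop1 a rest

-- 'cnt = 0; for i in range(len(arr)-1): …' reads the adjacent pair arr[i], arr[i+1]:
-- structural recursion on the suffix, matching the pair as x, y (continue on duplicates,
-- cnt += 1 on a +1 step, reset else, return 1 at cnt == 2)
def babyLoop2 : List Int → Int → Int
  | x :: y :: t, cnt =>
    if x = y then babyLoop2 (y :: t) cnt
    else
      let cnt' := if x + 1 = y then cnt + 1 else 0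
      if cnt' = 2 then 1 else babyLoop2 (y :: t) cnt'
  | _, _ => 0

def baby (arr : List Int) : Int :=
  let a := PySem.List.sorted arr (fun x => x) false
  if babyLoop1 a a then 1 else babyLoop2 a 0

-- ===== PORT B =====
def baby_alt (arr : List Int) : Int :=
  let a := PySem.List.sorted arr (fun x => x) false
  let c := a.foldl (fun d v => d.insert v (d.getD v 0 + 1)) (PySem.Dict.empty : PySem.Dict Int Int)
  if (PySem.Dict.values c).contains 3 then 1
  else
    let s := PySem.Set.ofList (PySem.Dict.keys c)
    if s.any (fun v => PySem.Set.contains s (v + 1) && PySem.Set.contains s (v + 2)) then 1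
    else 0

-- ===== PRECONDITION & SPEC =====
def Spec_baby (arr : List Int) (out : Int) : Prop := out = baby_alt arr
instance (arr : List Int) (out : Int) : Decidable (Spec_baby arr out) := by unfold Spec_baby; infer_instance

-- ===== CLAIM (what is proved, stated in full; the proofs are below) =====
def Claim_equal_baby : Prop := ∀ (arr : List Int), Dom_baby arr → Spec_baby arr (baby arr)

-- ===== LEMMAS AND PROOFS =====

-- 'three consecutive values are present'
def Good (l : List Int) : Prop := ∃ v ∈ l, v + 1 ∈ l ∧ v + 2 ∈ l

theorem runScan_nil (cnt : Int) : babyLoop2 [] cnt = 0 := rfl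

theorem runScan_single (x : Int) (cnt : Int) : babyLoop2 [x] cnt = 0 := rfl

theorem runScan_cons (x y : Int) (t : List Int) (cnt : Int) :
    babyLoop2 (x :: y :: t) cnt =
      if x = y then babyLoop2 (y :: t) cnt
      else if (if x + 1 = y then cnt + 1 else 0) = 2 then 1
      else babyLoop2 (y :: t) (if x + 1 = y then cnt + 1 else 0) := rfl

theorem babyLoop1_iff (a : List Int) (rest : List Int) :
    babyLoop1 a rest = true ↔ ∃ v ∈ rest, PySem.List.count a v = 3 := by
  induction rest with
  | nil => simp [babyLoop1]
  | cons x rest ih =>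
    rw [babyLoop1]
    by_cases hc : PySem.List.count a x = 3
    · rw [if_pos hc]
      exact iff_of_true rfl ⟨x, List.mem_cons_self .., hc⟩
    · rw [if_neg hc, ih]
      constructor
      · rintro ⟨v, hv, h3⟩; exact ⟨v, List.mem_cons_of_mem _ hv, h3⟩
      · rintro ⟨v, hv, h3⟩
        rcases List.mem_cons.mp hv with rfl | hv
        · exact absurd h3 hc
        · exact ⟨v, hv, h3⟩

theorem babyLoop2_zero_or_one (l : List Int) (cnt : Int) :
    babyLoop2 l cnt = 0 ∨ babyLoop2 l cnt = 1 := by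
  induction l generalizing cnt with
  | nil => left; rw [runScan_nil]
  | cons x t ih =>
    cases t with
    | nil => left; rw [runScan_single]
    | cons y t' =>
      rw [runScan_cons]
      by_cases he : x = y
      · rw [if_pos he]; exact ih cnt
      · rw [if_neg he]
        by_cases hs : x + 1 = y
        · rw [if_pos hs]
          by_cases h2 : cnt + 1 = 2
          · right; rw [if_pos h2]
          · rw [if_neg h2]; exact ih (cnt + 1)
        · rw [if_neg hs, if_neg (by norm_num : ¬(0 : Int) = 2)]
          exact ih 0

theorem good_cons_iff (x : Int) (T : List Int) (hle : ∀ z ∈ T, x ≤ z) :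
    Good (x :: T) ↔ (x + 1 ∈ T ∧ x + 2 ∈ T) ∨ Good T := by
  constructor
  · rintro ⟨v, hv, h1, h2⟩
    rcases List.mem_cons.mp hv with rfl | hv
    · left
      refine ⟨?_, ?_⟩
      · rcases List.mem_cons.mp h1 with h | h
        · omega
        · exact h
      · rcases List.mem_cons.mp h2 with h | h
        · omega
        · exact h
    · right
      have hvx : x ≤ v := hle v hv
      refine ⟨v, hv, ?_, ?_⟩
      · rcases List.mem_cons.mp h1 with h | h
        · omega
        · exact h
      · rcases List.mem_cons.mp h2 with h | h
        · omega
        · exact h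
  · rintro (⟨h1, h2⟩ | ⟨v, hv, h1, h2⟩)
    · exact ⟨x, List.mem_cons_self .., List.mem_cons_of_mem _ h1, List.mem_cons_of_mem _ h2⟩
    · exact ⟨v, List.mem_cons_of_mem _ hv, List.mem_cons_of_mem _ h1, List.mem_cons_of_mem _ h2⟩

theorem babyLoop2_main (l : List Int) (hs : l.Pairwise (· ≤ ·)) :
    (babyLoop2 l 0 = 1 ↔ Good l) ∧
    (∀ x t, l = x :: t → (babyLoop2 l 1 = 1 ↔ (x + 1 ∈ t ∨ Good l))) := by
  induction l with
  | nil =>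
    constructor
    · rw [runScan_nil]
      constructor
      · intro h; norm_num at h
      · rintro ⟨v, hv, -, -⟩; simp at hv
    · intro x t h; simp at h
  | cons x rest ih =>
    cases rest with
    | nil =>
      constructor
      · rw [runScan_single]
        constructor
        · intro h; norm_num at h
        · rintro ⟨v, hv, h1, -⟩
          obtain rfl := List.mem_singleton.mp hv
          have := List.mem_singleton.mp h1
          omega
      · intro x' t' hl
        injection hl with hx ht'
        subst hx; subst ht'
        rw [runScan_single]
        constructor
        · intro h; norm_num at h
        · rintro (h | ⟨v, hv, h1, -⟩)
          · simp at h
          · obtain rfl := List.mem_singleton.mp hv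
            have := List.mem_singleton.mp h1
            omega
    | cons y t =>
      have hp := List.pairwise_cons.mp hs
      have hxy : x ≤ y := hp.1 y (List.mem_cons_self ..)
      have hxall : ∀ z ∈ y :: t, x ≤ z := hp.1
      have hyall : ∀ z ∈ t, y ≤ z := (List.pairwise_cons.mp hp.2).1
      have htail := ih hp.2
      by_cases he : x = y
      · -- duplicate head: skipped, cnt kept
        have hG : Good (x :: y :: t) ↔ Good (y :: t) := by
          rw [good_cons_iff x (y :: t) hxall]
          constructor
          · rintro (⟨h1, h2⟩ | h)
            · exact ⟨x, by rw [he]; exact List.mem_cons_self .., h1, h2⟩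
            · exact h
          · intro h; right; exact h
        constructor
        · rw [runScan_cons, if_pos he, htail.1, hG]
        · intro x' t' hl
          injection hl with hx ht'
          subst hx; subst ht'
          rw [runScan_cons, if_pos he, htail.2 y t rfl, hG, he]
          constructor
          · rintro (h | h)
            · exact Or.inl (List.mem_cons_of_mem _ h)
            · exact Or.inr h
          · rintro (h | h)
            · rcases List.mem_cons.mp h with h' | h'
              · omega
              · exact Or.inl h'
            · exact Or.inr h
      · have hxy' : x < y := lt_of_le_of_ne hxy he
        by_cases hst : x + 1 = y
        · -- consecutive step: cnt + 1
          have hG : Good (x :: y :: t) ↔ (y + 1 ∈ t ∨ Good (y :: t)) := by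
            rw [good_cons_iff x (y :: t) hxall]
            constructor
            · rintro (⟨h1, h2⟩ | h)
              · left
                rcases List.mem_cons.mp h2 with h | h
                · omega
                · have hxy2 : x + 2 = y + 1 := by omega
                  rwa [hxy2] at h
              · right; exact h
            · rintro (h | h)
              · left
                refine ⟨by rw [hst]; exact List.mem_cons_self .., ?_⟩
                have hxy2 : x + 2 = y + 1 := by omega
                rw [hxy2]; exact List.mem_cons_of_mem _ h
              · right; exact h
          constructor
          · rw [runScan_cons, if_neg he, if_pos hst,
                if_neg (by norm_num : ¬(0 : Int) + 1 = 2), zero_add,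
                htail.2 y t rfl, hG]
          · intro x' t' hl
            injection hl with hx ht'
            subst hx; subst ht'
            rw [runScan_cons, if_neg he, if_pos hst,
                if_pos (by norm_num : (1 : Int) + 1 = 2)]
            refine iff_of_true rfl (Or.inl ?_)
            rw [hst]
            exact List.mem_cons_self ..
        · -- gap: cnt resets to 0
          have hgap : x + 1 < y := by omega
          have hnot : x + 1 ∉ y :: t := by
            intro hmem
            rcases List.mem_cons.mp hmem with h | h
            · omega
            · have := hyall _ h; omega
          have hG : Good (x :: y :: t) ↔ Good (y :: t) := by
            rw [good_cons_iff x (y :: t) hxall]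
            constructor
            · rintro (⟨h1, h2⟩ | h)
              · exact absurd h1 hnot
              · exact h
            · intro h; right; exact h
          have hstep : ∀ cnt : Int, babyLoop2 (x :: y :: t) cnt = babyLoop2 (y :: t) 0 := by
            intro cnt
            rw [runScan_cons, if_neg he, if_neg hst, if_neg (by norm_num : ¬(0 : Int) = 2)]
          constructor
          · rw [hstep 0, htail.1, hG]
          · intro x' t' hl
            injection hl with hx ht'
            subst hx; subst ht'
            rw [hstep 1, htail.1, hG]
            constructor
            · intro h; exact Or.inr h
            · rintro (h | h)
              · exact absurd h hnot
              · exact h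

theorem contains_iff_mem_int (l : List Int) (x : Int) : l.contains x = true ↔ x ∈ l := by
  simp

theorem values_counter_int (a : List Int) :
    (PySem.Dict.counter a : PySem.Dict Int Int).values
      = (PySem.Set.ofList a).map (fun k => (List.count k a : Int)) := by
  simp only [PySem.Dict.values, PySem.Dict.items_counter a, List.map_map]
  rfl

theorem cond1_eq (a : List Int) :
    babyLoop1 a a =
      ((a.foldl (fun d v => d.insert v (d.getD v 0 + 1))
          (PySem.Dict.empty : PySem.Dict Int Int)).values).contains 3 := by
  have hc : a.foldl (fun d v => d.insert v (d.getD v 0 + 1))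
      (PySem.Dict.empty : PySem.Dict Int Int) = PySem.Dict.counter a :=
    PySem.Dict.foldl_insert_getD_add_one_eq_counter a
  apply Bool.coe_iff_coe.mp
  rw [babyLoop1_iff a a, hc, values_counter_int, contains_iff_mem_int]
  constructor
  · rintro ⟨v, hv, h3⟩
    refine List.mem_map.mpr ⟨v, (PySem.Set.mem_ofList a v).mpr hv, ?_⟩
    rw [PySem.List.count_eq] at h3
    rw [h3]
    norm_cast
  · intro h
    rcases List.mem_map.mp h with ⟨v, hv, hval⟩
    refine ⟨v, (PySem.Set.mem_ofList a v).mp hv, ?_⟩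
    rw [PySem.List.count_eq]
    exact_mod_cast hval

theorem cond2_iff (a : List Int) :
    ((PySem.Set.ofList a).any
        (fun v => PySem.Set.contains (PySem.Set.ofList a) (v + 1) &&
                  PySem.Set.contains (PySem.Set.ofList a) (v + 2))) = true ↔ Good a := by
  rw [List.any_eq_true]
  constructor
  · rintro ⟨v, hv, hb⟩
    rcases Bool.and_eq_true .. |>.mp hb with ⟨h1, h2⟩
    exact ⟨v, (PySem.Set.mem_ofList a v).mp hv,
      (PySem.Set.mem_ofList a (v + 1)).mp ((PySem.Set.contains_iff ..).mp h1),
      (PySem.Set.mem_ofList a (v + 2)).mp ((PySem.Set.contains_iff ..).mp h2)⟩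
  · rintro ⟨v, hv, h1, h2⟩
    refine ⟨v, (PySem.Set.mem_ofList a v).mpr hv, ?_⟩
    rw [Bool.and_eq_true]
    exact ⟨(PySem.Set.contains_iff ..).mpr ((PySem.Set.mem_ofList a (v + 1)).mpr h1),
           (PySem.Set.contains_iff ..).mpr ((PySem.Set.mem_ofList a (v + 2)).mpr h2)⟩

-- ===== VERDICT (by name: the statement is the Claim_ definition above) =====
theorem baby_spec : Claim_equal_baby := by
  unfold Claim_equal_baby
  intro arr _
  unfold Spec_baby
  simp only [baby, baby_alt]
  set a := PySem.List.sorted arr (fun x => x) false with ha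
  have hsorted : a.Pairwise (· ≤ ·) := by
    rw [ha]; simpa using PySem.List.sorted_pairwise arr (fun x => x)
  have hc : a.foldl (fun d v => d.insert v (d.getD v 0 + 1))
      (PySem.Dict.empty : PySem.Dict Int Int) = PySem.Dict.counter a :=
    PySem.Dict.foldl_insert_getD_add_one_eq_counter a
  have hk : (PySem.Dict.counter a : PySem.Dict Int Int).keys = PySem.Set.ofList a :=
    PySem.Dict.keys_counter a
  rw [← cond1_eq a]
  by_cases h1 : babyLoop1 a a
  · rw [if_pos h1, if_pos h1]
  · rw [if_neg h1, if_neg h1, hc, hk, PySem.Set.ofList_ofList]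
    by_cases hG : Good a
    · rw [if_pos ((cond2_iff a).mpr hG), (babyLoop2_main a hsorted).1.mpr hG]
    · have h0 : babyLoop2 a 0 = 0 :=
        (babyLoop2_zero_or_one a 0).resolve_right (fun h => hG ((babyLoop2_main a hsorted).1.mp h))
      rw [h0, if_neg (fun h => hG ((cond2_iff a).mp h))]
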